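-- pv_equiv track=rewrite | github.com/toraora/ee123-image | jpeg_huffman.py | JPEG_VAL_ENCODE
-- ===== SOURCE A (Python) =====
-- def JPEG_VAL_ENCODE(val):
--     if val == 0:
--         return ''
--     neg = val < 0
--     if neg:
--         val = -val
--     bits = str(bin(val))[2:]
--     if neg:
--         bits = "".join(['1' if bit == '0' else '0' for bit in bits])
--     return bits
-- ===== SOURCE B (Python) =====
-- def JPEG_VAL_ENCODE(val):
--     if val == 0:
--         return ''
--     if val > 0:
--         return format(val, 'b')
--     m = -val
--     s = len(format(m, 'b'))
--     return format((1 << s) - 1 - m, 'b').zfill(s)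
-- ===== Notes on version B (the rewrite author's own statement) =====
-- stated objective: alternative
-- what changed: For negative values B computes the one's-complement code of the magnitude arithmetically (shift, subtract) and zero-pads its binary form to s bits, instead of A's per-character flip of the bit string via a list comprehension and join.
import Mathlib
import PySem

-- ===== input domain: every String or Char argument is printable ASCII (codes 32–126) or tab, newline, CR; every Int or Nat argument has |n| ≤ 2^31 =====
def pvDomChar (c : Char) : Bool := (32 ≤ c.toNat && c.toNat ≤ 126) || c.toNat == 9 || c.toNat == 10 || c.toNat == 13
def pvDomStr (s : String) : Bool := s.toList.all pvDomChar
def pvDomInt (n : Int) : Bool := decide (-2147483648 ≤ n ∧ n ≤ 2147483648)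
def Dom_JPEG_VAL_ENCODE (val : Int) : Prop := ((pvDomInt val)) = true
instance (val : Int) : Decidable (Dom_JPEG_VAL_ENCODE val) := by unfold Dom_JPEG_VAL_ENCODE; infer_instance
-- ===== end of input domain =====

-- B replaces A's per-character flip of the negative bit string by the arithmetic
-- one's complement of the magnitude, zero-padded to s bits (objective: alternative).

-- ===== PORT A =====
def JPEG_VAL_ENCODE (val : Int) : String :=
  if val == 0 then "" else
  let neg : Bool := decide (val < 0)
  let v := if neg then -val else val
  let bits := PySem.List.slice (PySem.Int.pyBin v).toList (some 2) none
  let bits' := if neg then bits.map (fun bit => if bit == '0' then '1' else '0') else bits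
  String.ofList bits'

-- ===== PORT B =====
def JPEG_VAL_ENCODE_alt (val : Int) : String :=
  if val == 0 then "" else
  if val > 0 then PySem.Int.toBin val
  else
    let m := -val
    let s := (PySem.Int.toBinChars m).length
    PySem.Str.zfill (PySem.Int.toBin ((1 <<< s) - 1 - m)) (s : Int)

-- ===== PRECONDITION & SPEC =====
def Spec_JPEG_VAL_ENCODE (val : Int) (out : String) : Prop := out = JPEG_VAL_ENCODE_alt val
instance (val : Int) (out : String) : Decidable (Spec_JPEG_VAL_ENCODE val out) := by unfold Spec_JPEG_VAL_ENCODE; infer_instance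

-- ===== CLAIM (what is proved, stated in full; the proofs are below) =====
def Claim_equal_JPEG_VAL_ENCODE : Prop := ∀ (val : Int), Dom_JPEG_VAL_ENCODE val → Spec_JPEG_VAL_ENCODE val (JPEG_VAL_ENCODE val)

-- ===== LEMMAS AND PROOFS =====

/-- Simple big-endian binary rendering; proved equal to `Nat.toDigits 2`. -/
def binChars (n : Nat) : List Char :=
  if _h : n < 2 then [Nat.digitChar n]
  else binChars (n / 2) ++ [Nat.digitChar (n % 2)]
decreasing_by exact Nat.div_lt_self (by omega) (by omega)

lemma toDigitsCore_eq_binChars : ∀ (fuel n : Nat) (acc : List Char), n < fuel →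
    Nat.toDigitsCore 2 fuel n acc = binChars n ++ acc := by
  intro fuel
  induction fuel with
  | zero => intro n acc h; omega
  | succ f ih =>
    intro n acc h
    rw [Nat.toDigitsCore]
    by_cases h2 : n / 2 = 0
    · have hn : n < 2 := by omega
      simp only [h2]
      rw [binChars, dif_pos hn, Nat.mod_eq_of_lt hn]
      rfl
    · simp only [if_neg h2]
      rw [ih (n / 2) _ (by omega)]
      conv_rhs => rw [binChars, dif_neg (by omega : ¬ n < 2)]
      simp

lemma toDigits_eq_binChars (n : Nat) : Nat.toDigits 2 n = binChars n := by
  rw [Nat.toDigits, toDigitsCore_eq_binChars (n + 1) n [] (by omega), List.append_nil]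

lemma binChars_length_pos (n : Nat) : 0 < (binChars n).length := by
  rw [binChars]; split <;> simp

lemma binChars_lt (n : Nat) : n < 2 ^ (binChars n).length := by
  induction n using binChars.induct with
  | case1 n h => rw [binChars, dif_pos h]; simpa using h
  | case2 n h ih =>
    rw [binChars, dif_neg h]
    simp only [List.length_append, List.length_singleton]
    have := binChars_length_pos (n / 2)
    rw [pow_succ]
    omega

lemma binChars_mem (n : Nat) : ∀ c ∈ binChars n, c = '0' ∨ c = '1' := by
  induction n using binChars.induct with
  | case1 n h =>
    rw [binChars, dif_pos h]
    interval_cases n <;> simp [Nat.digitChar]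
  | case2 n h ih =>
    rw [binChars, dif_neg h]
    intro c hc
    rcases List.mem_append.1 hc with hc | hc
    · exact ih c hc
    · have h2 : n % 2 < 2 := Nat.mod_lt _ (by omega)
      simp only [List.mem_singleton] at hc
      subst hc
      interval_cases h3 : n % 2 <;> simp [Nat.digitChar]

/-- Fixed-width (s bits) big-endian binary rendering of `n`. -/
def pad : Nat → Nat → List Char
  | 0, _ => []
  | s + 1, n => pad s (n / 2) ++ [Nat.digitChar (n % 2)]

lemma pad_length (s n : Nat) : (pad s n).length = s := by
  induction s generalizing n with
  | zero => rfl
  | succ t ih => simp [pad, ih]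

lemma map_flip_binChars (n : Nat) (hn : 0 < n) :
    (binChars n).map (fun bit => if bit == '0' then '1' else '0')
      = pad (binChars n).length (2 ^ (binChars n).length - 1 - n) := by
  induction n using binChars.induct with
  | case1 n h =>
    have : n = 1 := by omega
    subst this
    rw [binChars, dif_pos (by omega : (1:Nat) < 2)]
    decide
  | case2 n h ih =>
    have hlt := binChars_lt (n / 2)
    have hpos := binChars_length_pos (n / 2)
    have hnlt := binChars_lt n
    rw [binChars, dif_neg h] at hnlt ⊢
    simp only [List.length_append, List.length_singleton] at hnlt ⊢
    set L := (binChars (n / 2)).length with hL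
    have hP : 2 ^ (L + 1) = 2 * 2 ^ L := by rw [pow_succ]; ring
    rw [List.map_append, ih (by omega), pad]
    congr 1
    · congr 1
      omega
    · have h01 : n % 2 = 0 ∨ n % 2 = 1 := by omega
      have hm2 : (2 ^ (L + 1) - 1 - n) % 2 = 1 - n % 2 := by omega
      rw [hm2]
      rcases h01 with h1 | h1 <;> rw [h1] <;> rfl

lemma pad_eq_replicate (t : Nat) : ∀ n, n < 2 ^ (t + 1) →
    pad (t + 1) n = List.replicate (t + 1 - (binChars n).length) '0' ++ binChars n := by
  induction t with
  | zero =>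
    intro n hn
    have hn2 : n < 2 := by simpa using hn
    rw [pad, pad, binChars, dif_pos hn2, Nat.mod_eq_of_lt hn2]
    simp
  | succ t ih =>
    intro n hn
    rw [pad, ih (n / 2) (Nat.div_lt_of_lt_mul (by rw [← pow_succ' 2 (t + 1)]; exact hn))]
    by_cases h2 : n < 2
    · have : n / 2 = 0 := by omega
      rw [this]
      rw [binChars, dif_pos (by omega : (0:Nat) < 2)]
      rw [binChars, dif_pos h2, Nat.mod_eq_of_lt h2]
      simp only [List.length_singleton]
      rw [List.append_assoc]
      have : List.replicate (t + 1 - 1) '0' ++ ([Nat.digitChar 0] ++ [Nat.digitChar n])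
          = (List.replicate t '0' ++ ['0']) ++ [Nat.digitChar n] := by
        simp [Nat.digitChar]
      rw [this, ← List.replicate_succ']
      simp
    · conv_rhs => rw [binChars, dif_neg h2]
      simp only [List.length_append, List.length_singleton]
      rw [← List.append_assoc]
      have hc : t + 1 + 1 - ((binChars (n / 2)).length + 1)
          = t + 1 - (binChars (n / 2)).length := by omega
      rw [hc]

lemma binChars_length_le (s n : Nat) (h : n < 2 ^ (s + 1)) :
    (binChars n).length ≤ s + 1 := by
  have := pad_eq_replicate s n h
  have hlen := pad_length (s + 1) n
  rw [this] at hlen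
  simp at hlen
  omega

lemma zfill_binChars (t c : Nat) (hc : c < 2 ^ (t + 1)) :
    PySem.Chars.zfill (binChars c) ((t + 1 : Nat) : Int) = pad (t + 1) c := by
  have hle := binChars_length_le t c hc
  have hpos := binChars_length_pos c
  obtain ⟨x, rest, hx⟩ : ∃ x rest, binChars c = x :: rest := by
    cases hbc : binChars c with
    | nil => rw [hbc] at hpos; simp at hpos
    | cons x rest => exact ⟨x, rest, rfl⟩
  have hx01 : x = '0' ∨ x = '1' := binChars_mem c x (by rw [hx]; simp)
  have hns : ¬ (x = '+' ∨ x = '-') := by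
    rcases hx01 with h | h <;> subst h <;> decide
  rw [pad_eq_replicate t c hc, hx]
  rw [hx] at hle
  by_cases hw : ((t + 1 : Nat) : Int) ≤ ((x :: rest).length : Int)
  · have hw' : t + 1 ≤ (x :: rest).length := by exact_mod_cast hw
    rw [PySem.Chars.zfill.eq_def, if_pos hw]
    have h0 : t + 1 - (x :: rest).length = 0 := by omega
    rw [h0]
    simp
  · rw [PySem.Chars.zfill.eq_def, if_neg hw]
    simp only [if_neg hns]
    simp

-- ===== VERDICT (by name: the statement is the Claim_ definition above) =====
theorem JPEG_VAL_ENCODE_spec : Claim_equal_JPEG_VAL_ENCODE := by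
  intro val _
  unfold Spec_JPEG_VAL_ENCODE JPEG_VAL_ENCODE JPEG_VAL_ENCODE_alt
  by_cases h0 : val = 0
  · subst h0; rfl
  · rw [if_neg (by simpa using h0), if_neg (by simpa using h0)]
    by_cases hneg : val < 0
    · -- negative case
      simp only [hneg, decide_true, if_true, if_neg (by omega : ¬ val > 0)]
      have hm : (0 : Int) < -val := by omega
      set m : Nat := (-val).toNat with hmdef
      have hmval : (-val) = (m : Int) := by omega
      have hmpos : 0 < m := by omega
      -- A's bit list
      have hbin : (PySem.Int.pyBin (-val)).toList = '0' :: 'b' :: binChars m := by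
        rw [PySem.Int.pyBin]
        simp only [PySem.Int.toBinChars0b, if_neg (by omega : ¬ -val < 0)]
        simp only [String.toList_ofList, toDigits_eq_binChars]
        exact congrArg (fun k => '0' :: 'b' :: binChars k) hmdef.symm
      rw [hbin]
      have hslice : PySem.List.slice ('0' :: 'b' :: binChars m) (some 2) none = binChars m := by
        simp [PySem.List.slice, PySem.List.clampIdx]
      rw [hslice]
      -- B's side
      have htb : PySem.Int.toBinChars (-val) = binChars m := by
        simp only [PySem.Int.toBinChars, if_neg (by omega : ¬ -val < 0)]
        rw [toDigits_eq_binChars]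
      rw [htb]
      have hlt := binChars_lt m
      have hpos := binChars_length_pos m
      obtain ⟨t, ht⟩ : ∃ t, (binChars m).length = t + 1 := ⟨(binChars m).length - 1, by omega⟩
      set L := (binChars m).length with hLdef
      have hcode : ((1 <<< L : Nat) : Int) - 1 - (-val) = ((2 ^ L - 1 - m : Nat) : Int) := by
        rw [Nat.one_shiftLeft, hmval]
        omega
      rw [hcode]
      have hcodelt : 2 ^ L - 1 - m < 2 ^ L := by
        have : 0 < 2 ^ L := pow_pos (by omega : (0:ℕ) < 2) L
        omega
      have htbin : PySem.Int.toBin ((2 ^ L - 1 - m : Nat) : Int)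
          = String.ofList (binChars (2 ^ L - 1 - m)) := by
        rw [PySem.Int.toBin]
        simp only [PySem.Int.toBinChars,
          if_neg (not_lt.mpr (Int.natCast_nonneg _) : ¬ ((2 ^ L - 1 - m : Nat) : Int) < 0)]
        simp [toDigits_eq_binChars]
      rw [htbin]
      rw [PySem.Str.zfill]
      simp only [String.toList_ofList]
      rw [ht] at hcodelt ⊢
      rw [zfill_binChars t _ hcodelt]
      rw [map_flip_binChars m hmpos, ← hLdef, ht]
    · -- positive case
      have hvpos : val > 0 := by omega
      simp only [hneg, decide_false, Bool.false_eq_true, if_false, if_pos hvpos]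
      have hbin : (PySem.Int.pyBin val).toList = '0' :: 'b' :: binChars val.toNat := by
        rw [PySem.Int.pyBin]
        simp only [PySem.Int.toBinChars0b, if_neg (by omega : ¬ val < 0)]
        simp [toDigits_eq_binChars]
      rw [hbin]
      have hslice : PySem.List.slice ('0' :: 'b' :: binChars val.toNat) (some 2) none
          = binChars val.toNat := by
        simp [PySem.List.slice, PySem.List.clampIdx]
      rw [hslice]
      rw [PySem.Int.toBin]
      simp only [PySem.Int.toBinChars, if_neg (by omega : ¬ val < 0)]
      rw [toDigits_eq_binChars]
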